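-- pv_equiv track=rewrite | github.com/cuzic/ai-dev-yodoq | slides/recommend_layout.py | count_paragraphs
-- ===== SOURCE A (Python) =====
-- def count_paragraphs(content: str) -> int:
--     """段落数をカウント"""
--     # タイトル、箇条書き、コードブロック、空行を除いた段落
--     lines = content.split('\n')
--     paragraphs = 0
--     in_code_block = False
--     current_paragraph = []
--
--     for line in lines:
--         # コードブロックの開始/終了
--         if line.strip().startswith('```'):
--             in_code_block = not in_code_block
--             continue
--
--         if in_code_block:
--             continue
--
--         # 除外する行
--         if (line.strip().startswith('#') or
--             line.strip().startswith('-') or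
--             line.strip().startswith('*') or
--             line.strip().startswith('|') or
--             line.strip().startswith('![') or
--             line.strip().startswith('<!--') or
--             not line.strip()):
--             if current_paragraph:
--                 paragraphs += 1
--                 current_paragraph = []
--             continue
--
--         current_paragraph.append(line)
--
--     if current_paragraph:
--         paragraphs += 1
--
--     return paragraphs
-- ===== SOURCE B (Python) =====
-- def count_paragraphs(content: str) -> int:
--     """段落数をカウント"""
--     # Stage 1: cut the line list into fence-delimited segments (no toggle flag,
--     # no pending-paragraph buffer); segments at even positions lie outside code.
--     done, cur = [], []
--     for line in content.split('\n'):
--         if line.strip().startswith('```'):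
--             done.append(cur)
--             cur = []
--         else:
--             cur.append(line)
--     segments = done + [cur]
--     kept = [ln for seg in segments[0::2] for ln in seg]
--
--     # Stage 2: classify kept lines and count PARAGRAPH STARTS: a content line
--     # whose predecessor (False-padded) is not content.
--     def is_content(line):
--         s = line.strip()
--         return bool(s) and not s.startswith(('#', '-', '*', '|', '![', '<!--'))
--
--     flags = [is_content(ln) for ln in kept]
--     return sum(1 for prev, now in zip([False] + flags, flags) if now and not prev)
-- ===== Notes on version B (the rewrite author's own statement) =====
-- stated objective: alternative
-- what changed: B has no in_code toggle and no pending current_paragraph buffer: it cuts the line list into fence-delimited segments and keeps the even-indexed ones (outside code), then counts paragraph STARTS by zipping the content-flag list against its False-padded shift, instead of A's single state-machine loop that accumulates lines and flushes on break lines.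
import Mathlib
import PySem

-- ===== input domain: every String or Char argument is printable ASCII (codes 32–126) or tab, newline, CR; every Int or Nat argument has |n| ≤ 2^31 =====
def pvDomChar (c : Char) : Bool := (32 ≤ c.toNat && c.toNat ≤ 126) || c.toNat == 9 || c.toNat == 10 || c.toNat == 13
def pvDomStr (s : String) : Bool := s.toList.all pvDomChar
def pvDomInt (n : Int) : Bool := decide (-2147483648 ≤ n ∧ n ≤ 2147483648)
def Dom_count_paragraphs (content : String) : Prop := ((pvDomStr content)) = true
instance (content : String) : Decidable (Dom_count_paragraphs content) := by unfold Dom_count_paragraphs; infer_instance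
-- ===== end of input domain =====

-- B replaces A's state-machine loop (in_code toggle + pending buffer flushed on breaks) by
-- segment splitting at fences, keeping even-indexed segments, and counting paragraph starts
-- via a shifted zip of the content flags (alternative decomposition, same cost).

-- ===== PORT A =====
-- the big excluded-line condition of A's third branch (lines are List Char, via PySem.Chars)
def pa_isBreak (line : List Char) : Bool :=
  PySem.Chars.startswith (PySem.Chars.strip line) ['#'] ||
  PySem.Chars.startswith (PySem.Chars.strip line) ['-'] ||
  PySem.Chars.startswith (PySem.Chars.strip line) ['*'] ||
  PySem.Chars.startswith (PySem.Chars.strip line) ['|'] ||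
  PySem.Chars.startswith (PySem.Chars.strip line) ['!', '['] ||
  PySem.Chars.startswith (PySem.Chars.strip line) ['<', '!', '-', '-'] ||
  (PySem.Chars.strip line == [])

-- one iteration of A's for-loop: state = (paragraphs, in_code_block, current_paragraph)
def pa_step (st : Int × Bool × List (List Char)) (line : List Char) : Int × Bool × List (List Char) :=
  if PySem.Chars.startswith (PySem.Chars.strip line) ['`', '`', '`'] then (st.1, !st.2.1, st.2.2)
  else if st.2.1 then st
  else if pa_isBreak line then
    (if st.2.2.isEmpty then st.1 else st.1 + 1, st.2.1, [])
  else (st.1, st.2.1, st.2.2 ++ [line])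

def count_paragraphs (content : String) : Int :=
  let lines := PySem.Chars.splitOn content.toList ['\n']
  let r := lines.foldl pa_step (0, false, [])
  if r.2.2.isEmpty then r.1 else r.1 + 1

-- ===== PORT B =====
-- is_content of Source B
def pb_isContent (line : List Char) : Bool :=
  (PySem.Chars.strip line != []) &&
  !(PySem.Chars.startswith (PySem.Chars.strip line) ['#'] ||
    PySem.Chars.startswith (PySem.Chars.strip line) ['-'] ||
    PySem.Chars.startswith (PySem.Chars.strip line) ['*'] ||
    PySem.Chars.startswith (PySem.Chars.strip line) ['|'] ||
    PySem.Chars.startswith (PySem.Chars.strip line) ['!', '['] ||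
    PySem.Chars.startswith (PySem.Chars.strip line) ['<', '!', '-', '-'])

-- stage 1 loop of Source B: state = (done, cur); a fence closes cur into done
def pb_cutStep (st : List (List (List Char)) × List (List Char)) (line : List Char) :
    List (List (List Char)) × List (List Char) :=
  if PySem.Chars.startswith (PySem.Chars.strip line) ['`', '`', '`'] then (st.1 ++ [st.2], [])
  else (st.1, st.2 ++ [line])

-- segments[0::2] : every second element starting at index 0 (Python slice with step 2),
-- with its mutual helper for odd positions
mutual
def pb_evens {α : Type} : List α → List α
  | [] => []
  | x :: xs => x :: pb_odds xs
def pb_odds {α : Type} : List α → List α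
  | [] => []
  | _ :: xs => pb_evens xs
end

def count_paragraphs_alt (content : String) : Int :=
  let r := (PySem.Chars.splitOn content.toList ['\n']).foldl pb_cutStep ([], [])
  let segments := r.1 ++ [r.2]
  let kept := (pb_evens segments).flatten
  let flags := kept.map pb_isContent
  (((false :: flags).zip flags).countP (fun pc => pc.2 && !pc.1) : Int)

-- ===== PRECONDITION & SPEC =====
def Spec_count_paragraphs (content : String) (out : Int) : Prop := out = count_paragraphs_alt content
instance (content : String) (out : Int) : Decidable (Spec_count_paragraphs content out) := by unfold Spec_count_paragraphs; infer_instance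

-- ===== CLAIM (what is proved, stated in full; the proofs are below) =====
def Claim_equal_count_paragraphs : Prop := ∀ (content : String), Dom_count_paragraphs content → Spec_count_paragraphs content (count_paragraphs content)

-- ===== LEMMAS AND PROOFS =====

-- proof-only: number of content runs, given whether the previous kept line was content
def runsFrom : List Bool → Bool → Int
  | [], _ => 0
  | b :: bs, prev => (if b && !prev then 1 else 0) + runsFrom bs b

-- proof-only: the lines outside code blocks, dropping fences (recursive toggle form)
def keepR : List (List Char) → Bool → List (List Char)
  | [], _ => []
  | l :: ls, inCode =>
    if PySem.Chars.startswith (PySem.Chars.strip l) ['`', '`', '`'] then keepR ls (!inCode)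
    else if inCode then keepR ls inCode
    else l :: keepR ls inCode

-- proof-only: recursive form of the fence-segment split
def segsR : List (List Char) → List (List (List Char))
  | [] => [[]]
  | l :: ls =>
    if PySem.Chars.startswith (PySem.Chars.strip l) ['`', '`', '`'] then [] :: segsR ls
    else (segsR ls).modifyHead (l :: ·)

theorem content_eq_not_break (l : List Char) : pb_isContent l = !pa_isBreak l := by
  simp [pb_isContent, pa_isBreak, Bool.not_or, Bool.and_comm, Bool.and_assoc, bne]

theorem segsR_ne_nil (ls : List (List Char)) : segsR ls ≠ [] := by
  induction ls with
  | nil => simp [segsR]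
  | cons l ls ih =>
    simp only [segsR]
    split_ifs
    · simp
    · cases h : segsR ls <;> simp_all [List.modifyHead]

theorem modifyHead_id' {α : Type} (l : List α) : l.modifyHead (fun x => x) = l := by
  cases l <;> simp [List.modifyHead]

theorem cut_eq_segsR (ls : List (List Char)) :
    ∀ (done : List (List (List Char))) (cur : List (List Char)),
    (let r := ls.foldl pb_cutStep (done, cur); r.1 ++ [r.2])
      = done ++ (segsR ls).modifyHead (cur ++ ·) := by
  induction ls with
  | nil => intro done cur; simp [segsR]
  | cons l ls ih =>
    intro done cur
    simp only [List.foldl_cons, pb_cutStep, segsR]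
    split_ifs with hf
    · simp only [ih]
      cases segsR ls <;> simp [List.modifyHead]
    · rw [ih]
      obtain ⟨h, t, he⟩ : ∃ h t, segsR ls = h :: t := by
        cases hs : segsR ls with
        | nil => exact absurd hs (segsR_ne_nil ls)
        | cons h t => exact ⟨h, t, rfl⟩
      simp [he, List.modifyHead]

theorem evens_segs (ls : List (List Char)) :
    (pb_evens (segsR ls)).flatten = keepR ls false ∧
    (pb_odds (segsR ls)).flatten = keepR ls true := by
  induction ls with
  | nil => simp [segsR, pb_evens, pb_odds, keepR]
  | cons l ls ih =>
    simp only [segsR, keepR]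
    by_cases hf : PySem.Chars.startswith (PySem.Chars.strip l) ['`', '`', '`'] = true
    · simp only [hf, if_true, Bool.not_false, Bool.not_true]
      simpa [pb_evens, pb_odds] using ⟨ih.2, ih.1⟩
    · simp only [hf, if_false, Bool.false_eq_true, Bool.not_false, Bool.not_true]
      obtain ⟨h, t, he⟩ : ∃ h t, segsR ls = h :: t := by
        cases hs : segsR ls with
        | nil => exact absurd hs (segsR_ne_nil ls)
        | cons h t => exact ⟨h, t, rfl⟩
      rw [he]
      have h1 := ih.1; have h2 := ih.2
      rw [he] at h1 h2
      constructor
      · simp only [List.modifyHead, pb_evens, List.flatten_cons] at h1 ⊢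
        simp [← h1]
      · simpa only [List.modifyHead, pb_odds] using h2

-- the shifted-zip count equals runsFrom
theorem zip_count (flags : List Bool) : ∀ (prev : Bool),
    ((((prev :: flags).zip flags).countP (fun pc => pc.2 && !pc.1)) : Int)
      = runsFrom flags prev := by
  induction flags with
  | nil => intro prev; simp [runsFrom]
  | cons b bs ih =>
    intro prev
    simp only [List.zip_cons_cons, List.countP_cons, runsFrom, ← ih b]
    cases b <;> cases prev <;> simp <;> ring

-- A's fold produces the run count of the kept lines' break classification
theorem main_inv (ls : List (List Char)) : ∀ (p : Int) (inCode : Bool) (cur : List (List Char)),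
    (if (ls.foldl pa_step (p, inCode, cur)).2.2.isEmpty
      then (ls.foldl pa_step (p, inCode, cur)).1
      else (ls.foldl pa_step (p, inCode, cur)).1 + 1)
    = p + (if cur.isEmpty then 0 else 1)
        + runsFrom ((keepR ls inCode).map pb_isContent) (!cur.isEmpty) := by
  induction ls with
  | nil =>
    intro p inCode cur
    simp only [List.foldl_nil, keepR, List.map_nil, runsFrom]
    split_ifs with h <;> simp [h] <;> ring
  | cons l ls ih =>
    intro p inCode cur
    simp only [List.foldl_cons, pa_step, keepR]
    by_cases hf : PySem.Chars.startswith (PySem.Chars.strip l) ['`', '`', '`'] = true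
    · rw [if_pos hf, if_pos hf]
      exact ih p (!inCode) cur
    · rw [if_neg hf, if_neg hf]
      cases inCode with
      | true => simpa using ih p true cur
      | false =>
        simp only [Bool.false_eq_true, if_false, List.map_cons, content_eq_not_break]
        by_cases hb : pa_isBreak l = true
        · rw [if_pos hb, ih]
          simp only [hb, Bool.not_true, runsFrom, Bool.false_and, if_false,
            List.isEmpty_nil, if_true, Bool.not_true]
          cases hcur : cur.isEmpty <;> simp <;> ring
        · rw [if_neg hb, ih]
          have hb' : pa_isBreak l = false := by simpa using hb
          have hne : (cur ++ [l]).isEmpty = false := by simp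
          cases hcur : cur.isEmpty <;> simp [hb', hcur, hne, runsFrom] <;> ring

-- ===== VERDICT (by name: the statement is the Claim_ definition above) =====
theorem count_paragraphs_spec : Claim_equal_count_paragraphs := by
  unfold Claim_equal_count_paragraphs
  intro content _
  unfold Spec_count_paragraphs count_paragraphs count_paragraphs_alt
  simp only [cut_eq_segsR _ [] [], List.nil_append, zip_count]
  rw [modifyHead_id', (evens_segs _).1]
  simpa using main_inv (PySem.Chars.splitOn content.toList ['\n']) 0 false []
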